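-- pv_equiv track=rewrite | github.com/literallyme1/coding_test_algorithm | basic_level/divisor/17425_another_ver.py | calculate_f_g
-- ===== SOURCE A (Python) =====
-- def calculate_f_g(N_max):
--
--     divisor_sum = [1] * (N_max + 1) #모든 자연수는 1을 약수로 가짐.
--     g_values = [0] * (N_max + 1)
--     g_values[1] = 1
--
--     #약수의 합 f(x) 계산
--     for i in range(2, N_max + 1):
--         for multiple in range(1, (N_max // i) + 1):
--             divisor_sum[multiple * i] += i # i가 2 일 때, 2*1, 2*2 ...
--
--         #누적 합 g(x) 계산
--         g_values[i] = g_values[i - 1] + divisor_sum[i]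
--
--     return g_values
-- ===== SOURCE B (Python) =====
-- def calculate_f_g(N_max):
--     # Sieve over factor pairs (d, m) with d <= m: each pair d*m <= N_max
--     # contributes d + m (or d when d == m) to sigma(d*m); inner range is
--     # empty once d > N_max // d, so only ~sqrt(N_max) outer rounds do work.
--     sigma = [0] * (N_max + 1)
--     for d in range(1, N_max + 1):
--         for m in range(d, N_max // d + 1):
--             sigma[d * m] += d if d == m else d + m
--     g = [0] * (N_max + 1)
--     total = 0
--     for k in range(1, N_max + 1):
--         total += sigma[k]
--         g[k] = total
--     return g
-- ===== Notes on version B (the rewrite author's own statement) =====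
-- stated objective: faster
-- what changed: A sieves sigma by adding each divisor i to all its multiples (full harmonic loop) with the prefix sum interleaved; B instead enumerates factor pairs (d, m) with d <= m <= N//d, adding d+m (or d when d=m) to sigma(d*m) once per pair — about half the update operations — and computes the prefix sums in a separate single pass.
-- crash fix: On N_max <= 0 A raises IndexError (the unconditional seed write into g_values' second slot lands outside the freshly built list) while B returns the degenerate prefix table ([0] for N_max = 0, [] for negative N_max). — e.g. on calculate_f_g(0): A raises IndexError, B returns [0]
import Mathlib
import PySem

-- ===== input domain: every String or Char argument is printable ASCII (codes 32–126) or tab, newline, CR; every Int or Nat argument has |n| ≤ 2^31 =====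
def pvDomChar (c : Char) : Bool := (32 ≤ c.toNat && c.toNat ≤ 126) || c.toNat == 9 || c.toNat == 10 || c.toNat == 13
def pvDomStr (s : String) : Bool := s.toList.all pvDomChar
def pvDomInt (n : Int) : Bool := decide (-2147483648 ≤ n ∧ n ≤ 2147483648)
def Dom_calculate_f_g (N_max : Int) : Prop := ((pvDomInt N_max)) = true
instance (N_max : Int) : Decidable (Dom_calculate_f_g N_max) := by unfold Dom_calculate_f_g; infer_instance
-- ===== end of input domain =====

-- B replaces A's per-divisor multiple sieve by a factor-pair sieve (each pair (d, m), d ≤ m,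
-- contributes d + m — or d when d = m — to σ(d*m)) plus a separate prefix-sum pass: roughly half
-- the update operations, measured faster by a constant factor; same return values for N_max ≥ 1.

-- ===== PORT A =====
def calculate_f_g (N_max : Int) : List Int :=
  let divisor_sum : List Int := List.replicate (N_max + 1).toNat 1
  let g_values : List Int := List.replicate (N_max + 1).toNat 0
  let g_values := g_values.set 1 1
  let st :=
    (PySem.List.pyRange 2 (N_max + 1) 1).foldl
      (fun (st : List Int × List Int) i =>
        let ds :=
          (PySem.List.pyRange 1 (PySem.Int.floordiv N_max i + 1) 1).foldl
            (fun ds mult =>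
              ds.set (mult * i).toNat (ds.getD (mult * i).toNat 0 + i)) st.1
        (ds, st.2.set i.toNat (st.2.getD (i - 1).toNat 0 + ds.getD i.toNat 0)))
      (divisor_sum, g_values)
  st.2

-- ===== PORT B =====
def calculate_f_g_alt (N_max : Int) : List Int :=
  let sigma : List Int := List.replicate (N_max + 1).toNat 0
  let sigma :=
    (PySem.List.pyRange 1 (N_max + 1) 1).foldl
      (fun s d =>
        (PySem.List.pyRange d (PySem.Int.floordiv N_max d + 1) 1).foldl
          (fun s m =>
            s.set (d * m).toNat
              (s.getD (d * m).toNat 0 + if d = m then d else d + m)) s)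
      sigma
  let g : List Int := List.replicate (N_max + 1).toNat 0
  let st :=
    (PySem.List.pyRange 1 (N_max + 1) 1).foldl
      (fun (st : List Int × Int) k =>
        let total := st.2 + sigma.getD k.toNat 0
        (st.1.set k.toNat total, total))
      (g, 0)
  st.1

-- ===== PRECONDITION & SPEC =====
-- Pre_ excludes exactly N_max ≤ 0, on which A raises IndexError (the unconditional seed write into
-- g_values' second slot lands outside the freshly built list).
def Pre_calculate_f_g (N_max : Int) : Prop := 1 ≤ N_max
instance (N_max : Int) : Decidable (Pre_calculate_f_g N_max) := by
  unfold Pre_calculate_f_g; infer_instance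

def pvWitness_calculate_f_g : Int := 5

-- On N_max ≤ 0 A raises IndexError while B returns the degenerate prefix table ([0] for N_max = 0,
-- [] for negative N_max).
def Raises_calculate_f_g (N_max : Int) : Prop := N_max ≤ 0
instance (N_max : Int) : Decidable (Raises_calculate_f_g N_max) := by
  unfold Raises_calculate_f_g; infer_instance

def pvRaiseWitness_calculate_f_g : Int := 0
def pvRaiseWitnessOut_calculate_f_g : List Int := [0]

def Spec_calculate_f_g (N_max : Int) (out : List Int) : Prop := out = calculate_f_g_alt N_max
instance (N_max : Int) (out : List Int) : Decidable (Spec_calculate_f_g N_max out) := by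
  unfold Spec_calculate_f_g; infer_instance

-- ===== CLAIM (what is proved, stated in full; the proofs are below) =====
def Claim_equal_calculate_f_g : Prop := ∀ (N_max : Int), Dom_calculate_f_g N_max → Pre_calculate_f_g N_max → Spec_calculate_f_g N_max (calculate_f_g N_max)

def Claim_raises_calculate_f_g : Prop := (∀ (N_max : Int), Dom_calculate_f_g N_max → Raises_calculate_f_g N_max → ¬ Pre_calculate_f_g N_max) ∧ (Dom_calculate_f_g (pvRaiseWitness_calculate_f_g) ∧ Raises_calculate_f_g (pvRaiseWitness_calculate_f_g) ∧ calculate_f_g_alt (pvRaiseWitness_calculate_f_g) = pvRaiseWitnessOut_calculate_f_g)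

-- ===== LEMMAS AND PROOFS =====

-- σ(k) as an Int, and the prefix sum G(k) = Σ_{j=1}^k σ(j)
def sigInt (k : Nat) : Int := ((k.divisors.sum id : Nat) : Int)
def Gpre (k : Nat) : Int := ∑ j ∈ Finset.Icc 1 k, sigInt j

-- generic "scatter add" fold characterization
theorem scatter_length {α : Type} (l : List α) (idx : α → Nat) (val : α → Int) (a : List Int) :
    (l.foldl (fun b u => b.set (idx u) (b.getD (idx u) 0 + val u)) a).length = a.length := by
  induction l generalizing a with
  | nil => rfl
  | cons u l ih =>
    simp only [List.foldl_cons]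
    rw [ih, List.length_set]

theorem getD_set_self (a : List Int) (j : Nat) (v : Int) (k : Nat) (hk : k < a.length) :
    (a.set j v).getD k 0 = if j = k then v else a.getD k 0 := by
  rw [List.getD_eq_getElem _ _ (by simpa using hk), List.getElem_set]
  split_ifs with h
  · rfl
  · exact (List.getD_eq_getElem _ _ hk).symm

theorem scatter_getD {α : Type} (l : List α) (idx : α → Nat) (val : α → Int) (a : List Int)
    (k : Nat) (hk : k < a.length) :
    (l.foldl (fun b u => b.set (idx u) (b.getD (idx u) 0 + val u)) a).getD k 0
      = a.getD k 0 + ((l.filter (fun u => idx u = k)).map val).sum := by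
  induction l generalizing a with
  | nil => simp
  | cons u l ih =>
    simp only [List.foldl_cons]
    rw [ih _ (by simpa using hk)]
    rw [getD_set_self a (idx u) _ k hk]
    by_cases h : idx u = k
    · simp [h]; ring
    · simp [h]

theorem sum_filter_range (m : Nat) (p : Nat → Bool) (v : Nat → Int) :
    (((List.range m).filter p).map v).sum = ∑ t ∈ Finset.range m, if p t then v t else 0 := by
  induction m with
  | zero => simp
  | succ m ih =>
    rw [List.range_succ, Finset.sum_range_succ, List.filter_append, List.map_append,
      List.sum_append, ih]
    by_cases h : p m <;> simp [h]

theorem innerA_char (n i : Nat) (hi : 1 ≤ i) (a : List Int) (ha : a.length = n + 1) :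
    (((PySem.List.pyRange 1 ((PySem.Int.floordiv (n : Int) (i : Int)) + 1) 1).foldl
        (fun ds mult =>
          ds.set (mult * (i : Int)).toNat (ds.getD (mult * (i : Int)).toNat 0 + (i : Int))) a).length
        = n + 1) ∧
    (∀ k, k ≤ n →
      ((PySem.List.pyRange 1 ((PySem.Int.floordiv (n : Int) (i : Int)) + 1) 1).foldl
        (fun ds mult =>
          ds.set (mult * (i : Int)).toNat (ds.getD (mult * (i : Int)).toNat 0 + (i : Int))) a).getD k 0
        = a.getD k 0 + (if i ∣ k ∧ i ≤ k then (i : Int) else 0)) := by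
  have hcast : ∀ t : Nat, (((1 : Int) + (t : Int)) * (i : Int)).toNat = (1 + t) * i := by
    intro t
    have : ((1 : Int) + (t : Int)) * (i : Int) = (((1 + t) * i : Nat) : Int) := by push_cast; ring
    rw [this, Int.toNat_natCast]
  rw [PySem.Int.floordiv_natCast, PySem.List.pyRange_one]
  simp only [add_sub_cancel_right, Int.toNat_natCast, List.foldl_map]
  constructor
  · rw [scatter_length (List.range (n / i))
      (fun t : Nat => (((1 : Int) + (t : Int)) * (i : Int)).toNat) (fun _ => (i : Int)) a, ha]
  · intro k hk
    rw [scatter_getD (List.range (n / i))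
      (fun t : Nat => (((1 : Int) + (t : Int)) * (i : Int)).toNat) (fun _ => (i : Int)) a k
      (by omega)]
    congr 1
    rw [sum_filter_range]
    simp only [hcast]
    by_cases h : i ∣ k ∧ i ≤ k
    · obtain ⟨hdvd, hle⟩ := h
      have hq1 : 1 ≤ k / i := (Nat.one_le_div_iff (by omega)).mpr hle
      have hqi : k / i * i = k := Nat.div_mul_cancel hdvd
      have hmem : k / i - 1 ∈ Finset.range (n / i) := by
        have : k / i ≤ n / i := Nat.div_le_div_right hk
        simp only [Finset.mem_range]; omega
      rw [Finset.sum_eq_single_of_mem (k / i - 1) hmem]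
      · have h1 : (1 + (k / i - 1)) * i = k := by
          have : 1 + (k / i - 1) = k / i := by omega
          rw [this, hqi]
        simp [h1, hdvd, hle]
      · intro b _ hb
        have : ¬ (1 + b) * i = k := by
          intro h'
          apply hb
          have : 1 + b = k / i := by
            apply Nat.eq_of_mul_eq_mul_right (show 0 < i by omega)
            rw [h', hqi]
          omega
        simp [this]
    · rw [Finset.sum_eq_zero, if_neg h]
      intro t _
      have : ¬ (1 + t) * i = k := by
        intro h'
        exact h ⟨Dvd.intro_left (1 + t) h', by calc i = 1 * i := (one_mul i).symm
          _ ≤ (1 + t) * i := Nat.mul_le_mul_right i (by omega)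
          _ = k := h'⟩
      simp [this]

theorem innerB_char (n d : Nat) (hd : 1 ≤ d) (a : List Int) (ha : a.length = n + 1) :
    (((PySem.List.pyRange (d : Int) ((PySem.Int.floordiv (n : Int) (d : Int)) + 1) 1).foldl
        (fun s m =>
          s.set ((d : Int) * m).toNat
            (s.getD ((d : Int) * m).toNat 0 + if (d : Int) = m then (d : Int) else (d : Int) + m)) a).length
        = n + 1) ∧
    (∀ k, k ≤ n →
      ((PySem.List.pyRange (d : Int) ((PySem.Int.floordiv (n : Int) (d : Int)) + 1) 1).foldl
        (fun s m =>
          s.set ((d : Int) * m).toNat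
            (s.getD ((d : Int) * m).toNat 0 + if (d : Int) = m then (d : Int) else (d : Int) + m)) a).getD k 0
        = a.getD k 0 + (if d ∣ k ∧ d * d ≤ k then (if d * d = k then (d : Int) else (d : Int) + (k / d : Nat)) else 0)) := by
  have hcast : ∀ t : Nat, ((d : Int) * ((d : Int) + (t : Int))).toNat = d * (d + t) := by
    intro t
    have : (d : Int) * ((d : Int) + (t : Int)) = ((d * (d + t) : Nat) : Int) := by push_cast; ring
    rw [this, Int.toNat_natCast]
  have hval : ∀ t : Nat, ((d : Int) = (d : Int) + (t : Int)) ↔ t = 0 := by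
    intro t; omega
  rw [PySem.Int.floordiv_natCast, PySem.List.pyRange_one]
  have hrng : (((n / d : Nat) : Int) + 1 - (d : Int)).toNat = n / d + 1 - d := by
    generalize n / d = q; omega
  rw [hrng]
  simp only [List.foldl_map]
  constructor
  · rw [scatter_length (List.range (n / d + 1 - d))
      (fun t : Nat => ((d : Int) * ((d : Int) + (t : Int))).toNat)
      (fun t : Nat => if (d : Int) = (d : Int) + (t : Int) then (d : Int) else (d : Int) + ((d : Int) + (t : Int))) a, ha]
  · intro k hk
    rw [scatter_getD (List.range (n / d + 1 - d))
      (fun t : Nat => ((d : Int) * ((d : Int) + (t : Int))).toNat)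
      (fun t : Nat => if (d : Int) = (d : Int) + (t : Int) then (d : Int) else (d : Int) + ((d : Int) + (t : Int))) a k
      (by omega)]
    congr 1
    rw [sum_filter_range]
    simp only [hcast, decide_eq_true_eq]
    by_cases h : d ∣ k ∧ d * d ≤ k
    · obtain ⟨hdvd, hsq⟩ := h
      have hk1 : 1 ≤ k := le_trans (le_trans (by omega) (Nat.mul_le_mul hd hd)) hsq
      have hqd : k / d * d = k := Nat.div_mul_cancel hdvd
      have hdq : d ≤ k / d := by
        rw [Nat.le_div_iff_mul_le (by omega)]
        exact hsq
      have hqn : k / d ≤ n / d := Nat.div_le_div_right hk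
      have hmem : k / d - d ∈ Finset.range (n / d + 1 - d) := by
        simp only [Finset.mem_range]; omega
      rw [Finset.sum_eq_single_of_mem (k / d - d) hmem]
      · have h1 : d * (d + (k / d - d)) = k := by
          have hq : d + (k / d - d) = k / d := by omega
          rw [hq, Nat.mul_div_cancel' hdvd]
        have hcond : d ∣ k ∧ d * d ≤ k := ⟨hdvd, hsq⟩
        rw [if_pos h1, if_pos hcond]
        by_cases hdd : d * d = k
        · have hqe : k / d = d := by
            rw [← hdd, Nat.mul_div_cancel_left d (by omega)]
          have hz : k / d - d = 0 := by omega
          rw [if_pos hdd, if_pos (by rw [hz, Nat.cast_zero, add_zero] : (d : Int) = (d : Int) + ((k / d - d : Nat) : Int))]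
        · have hlt : d < k / d := by
            rcases Nat.lt_or_ge d (k / d) with h' | h'
            · exact h'
            · exfalso
              have : k / d = d := by omega
              rw [← hqd, this] at hdd
              exact hdd rfl
          have hne : ¬ ((d : Int) = (d : Int) + ((k / d - d : Nat) : Int)) := by
            omega
          rw [if_neg hne, if_neg hdd]
          have hsum : (d : Int) + ((k / d - d : Nat) : Int) = ((k / d : Nat) : Int) := by
            omega
          rw [hsum]
      · intro b _ hb
        have hne : ¬ d * (d + b) = k := by
          intro h'
          apply hb
          have : d + b = k / d := by
            apply Nat.eq_of_mul_eq_mul_left (show 0 < d by omega)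
            rw [h', Nat.mul_div_cancel' hdvd]
          omega
        simp [hne]
    · rw [Finset.sum_eq_zero, if_neg h]
      intro t _
      have : ¬ d * (d + t) = k := by
        intro h'
        exact h ⟨Dvd.intro (d + t) h', by nlinarith⟩
      simp [this]

theorem pairing (k : Nat) (hk : 1 ≤ k) :
    ∑ d ∈ k.divisors.filter (fun d => d * d ≤ k),
        (if d * d = k then (d : Int) else (d : Int) + (k / d : Nat)) = sigInt k := by
  have hmem : ∀ d ∈ k.divisors, d ∣ k ∧ 1 ≤ d ∧ 1 ≤ k / d ∧ d * (k / d) = k := by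
    intro d hd
    obtain ⟨hdvd, hne⟩ := Nat.mem_divisors.mp hd
    have hd1 : 1 ≤ d := Nat.pos_of_dvd_of_pos hdvd (by omega)
    have hmul : d * (k / d) = k := Nat.mul_div_cancel' hdvd
    have he1 : 1 ≤ k / d := (Nat.one_le_div_iff (by omega)).mpr (Nat.le_of_dvd (by omega) hdvd)
    exact ⟨hdvd, hd1, he1, hmul⟩
  have hstep : ∀ d ∈ k.divisors.filter (fun d => d * d ≤ k),
      (if d * d = k then (d : Int) else (d : Int) + ((k / d : Nat) : Int))
        = (d : Int) + (if d * d = k then 0 else ((k / d : Nat) : Int)) := by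
    intro d _
    split_ifs <;> ring
  rw [Finset.sum_congr rfl hstep, Finset.sum_add_distrib]
  have hsig : sigInt k = ∑ d ∈ k.divisors, (d : Int) := by
    rw [sigInt]; push_cast; rfl
  rw [hsig, ← Finset.sum_filter_add_sum_filter_not k.divisors (fun d => d * d ≤ k) (fun d => (d : Int))]
  congr 1
  rw [Finset.sum_filter, Finset.sum_filter]
  have h2 : ∑ d ∈ k.divisors, (if d * d ≤ k then (if d * d = k then (0 : Int) else ((k / d : Nat) : Int)) else 0)
      = ∑ d ∈ k.divisors, (if d * d < k then ((k / d : Nat) : Int) else 0) := by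
    apply Finset.sum_congr rfl
    intro d _
    rcases Nat.lt_trichotomy (d * d) k with h' | h' | h'
    · rw [if_pos (le_of_lt h'), if_neg (by omega), if_pos h']
    · rw [if_pos (le_of_eq h'), if_pos h', if_neg (by omega)]
    · rw [if_neg (by omega), if_neg (by omega)]
  rw [h2]
  simp only [Nat.not_le]
  have key := Nat.sum_div_divisors (α := Int) k (fun d => if k < d * d then (d : Int) else 0)
  rw [← key]
  apply Finset.sum_congr rfl
  intro d hd
  obtain ⟨hdvd, hd1, he1, hmul⟩ := hmem d hd
  have hiff : (k < (k / d) * (k / d)) ↔ (d * d < k) := by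
    constructor
    · intro h'; nlinarith
    · intro h'; nlinarith
  by_cases h' : d * d < k
  · rw [if_pos h', if_pos (hiff.mpr h')]
  · rw [if_neg h', if_neg (fun hh => h' (hiff.mp hh))]

theorem sum_Icc2_dvd (i : Nat) (hi : 1 ≤ i) :
    (1 : Int) + ∑ d ∈ Finset.Icc 2 i, (if d ∣ i ∧ d ≤ i then (d : Int) else 0) = sigInt i := by
  have h1 : ∑ d ∈ Finset.Icc 2 i, (if d ∣ i ∧ d ≤ i then (d : Int) else 0)
      = ∑ d ∈ Finset.Icc 2 i, (if d ∣ i then (d : Int) else 0) := by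
    apply Finset.sum_congr rfl
    intro d hd
    rw [Finset.mem_Icc] at hd
    by_cases h' : d ∣ i
    · rw [if_pos ⟨h', hd.2⟩, if_pos h']
    · rw [if_neg (fun hh => h' hh.1), if_neg h']
  have h2 : Finset.Icc 1 i = insert 1 (Finset.Icc 2 i) := by
    ext d
    simp only [Finset.mem_Icc, Finset.mem_insert]
    omega
  have h3 : ∑ d ∈ Finset.Icc 1 i, (if d ∣ i then (d : Int) else 0)
      = 1 + ∑ d ∈ Finset.Icc 2 i, (if d ∣ i then (d : Int) else 0) := by
    rw [h2, Finset.sum_insert (by simp [Finset.mem_Icc])]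
    simp
  have h4 : Finset.filter (fun d => d ∣ i) (Finset.Icc 1 i) = i.divisors := by
    ext d
    simp only [Finset.mem_filter, Finset.mem_Icc, Nat.mem_divisors]
    constructor
    · rintro ⟨⟨_, _⟩, hdvd⟩
      exact ⟨hdvd, by omega⟩
    · rintro ⟨hdvd, _⟩
      exact ⟨⟨Nat.pos_of_dvd_of_pos hdvd (by omega), Nat.le_of_dvd (by omega) hdvd⟩, hdvd⟩
  have h5 : sigInt i = ∑ d ∈ Finset.Icc 1 i, (if d ∣ i then (d : Int) else 0) := by
    rw [sigInt, ← Finset.sum_filter, h4]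
    push_cast
    rfl
  rw [h1, h5, h3]

theorem sum_Icc1_pairs (n k : Nat) (hk1 : 1 ≤ k) (hkn : k ≤ n) :
    ∑ d ∈ Finset.Icc 1 n,
        (if d ∣ k ∧ d * d ≤ k then (if d * d = k then (d : Int) else (d : Int) + (k / d : Nat)) else 0)
      = sigInt k := by
  rw [← Finset.sum_filter]
  have h4 : Finset.filter (fun d => d ∣ k ∧ d * d ≤ k) (Finset.Icc 1 n)
      = k.divisors.filter (fun d => d * d ≤ k) := by
    ext d
    simp only [Finset.mem_filter, Finset.mem_Icc, Nat.mem_divisors]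
    constructor
    · rintro ⟨⟨_, _⟩, hdvd, hsq⟩
      exact ⟨⟨hdvd, by omega⟩, hsq⟩
    · rintro ⟨⟨hdvd, _⟩, hsq⟩
      exact ⟨⟨Nat.pos_of_dvd_of_pos hdvd (by omega),
        le_trans (Nat.le_of_dvd (by omega) hdvd) hkn⟩, hdvd, hsq⟩
  rw [h4]
  exact pairing k hk1

theorem sum_Icc1_pairs_zero (n : Nat) :
    ∑ d ∈ Finset.Icc 1 n,
        (if d ∣ 0 ∧ d * d ≤ 0 then (if d * d = 0 then (d : Int) else (d : Int) + (0 / d : Nat)) else 0)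
      = 0 := by
  apply Finset.sum_eq_zero
  intro d hd
  rw [Finset.mem_Icc] at hd
  have : ¬ (d ∣ 0 ∧ d * d ≤ 0) := by
    rintro ⟨_, hsq⟩
    have : 1 ≤ d * d := Nat.mul_le_mul hd.1 hd.1
    omega
  rw [if_neg this]

def AStep (n : Nat) : List Int × List Int → Int → List Int × List Int :=
  fun st i =>
    let ds :=
      (PySem.List.pyRange 1 (PySem.Int.floordiv (n : Int) i + 1) 1).foldl
        (fun ds mult =>
          ds.set (mult * i).toNat (ds.getD (mult * i).toNat 0 + i)) st.1
    (ds, st.2.set i.toNat (st.2.getD (i - 1).toNat 0 + ds.getD i.toNat 0))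

def AInit (n : Nat) : List Int × List Int :=
  (List.replicate (n + 1) (1 : Int), (List.replicate (n + 1) (0 : Int)).set 1 1)

theorem Gpre_zero : Gpre 0 = 0 := by simp [Gpre]

theorem Gpre_one : Gpre 1 = 1 := by
  simp [Gpre, sigInt, Nat.divisors_one]

theorem Gpre_succ (j : Nat) : Gpre (j + 1) = Gpre j + sigInt (j + 1) := by
  rw [Gpre, Gpre, Finset.sum_Icc_succ_top (by omega)]

theorem A_outer (n : Nat) (_hn : 1 ≤ n) (j : Nat) (h1 : 1 ≤ j) (hj : j ≤ n) :
    (((PySem.List.pyRange 2 ((j : Int) + 1) 1).foldl (AStep n) (AInit n)).1.length = n + 1) ∧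
    (((PySem.List.pyRange 2 ((j : Int) + 1) 1).foldl (AStep n) (AInit n)).2.length = n + 1) ∧
    (∀ k, k ≤ n →
      (((PySem.List.pyRange 2 ((j : Int) + 1) 1).foldl (AStep n) (AInit n)).1.getD k 0
        = 1 + ∑ d ∈ Finset.Icc 2 j, (if d ∣ k ∧ d ≤ k then (d : Int) else 0))) ∧
    (∀ k, k ≤ n →
      (((PySem.List.pyRange 2 ((j : Int) + 1) 1).foldl (AStep n) (AInit n)).2.getD k 0
        = if 1 ≤ k ∧ k ≤ j then Gpre k else 0)) := by
  induction j, h1 using Nat.le_induction with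
  | base =>
    have hempty : PySem.List.pyRange 2 ((1 : Nat) + 1) 1 = [] := by
      rw [PySem.List.pyRange_one]
      norm_num
    rw [hempty]
    simp only [List.foldl_nil, AInit]
    refine ⟨by simp, by simp, ?_, ?_⟩
    · intro k hk
      rw [Finset.Icc_eq_empty (by omega), Finset.sum_empty,
        List.getD_replicate _ (by omega)]
      norm_num
    · intro k hk
      rw [getD_set_self _ _ _ _ (by simp; omega)]
      by_cases h1k : 1 = k
      · rw [if_pos h1k, if_pos (by omega), ← h1k, Gpre_one]
      · rw [if_neg h1k, List.getD_replicate _ (by omega), if_neg (by omega)]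
  | succ j hj1 ih =>
    have hj' : j ≤ n := by omega
    obtain ⟨hL1, hL2, hds, hg⟩ := ih hj'
    have hcast : ((j : Int) + 1) = (((j + 1 : Nat)) : Int) := by push_cast; ring
    have happ : PySem.List.pyRange 2 (((j + 1 : Nat) : Int) + 1) 1
        = PySem.List.pyRange 2 ((j : Int) + 1) 1 ++ [((j + 1 : Nat) : Int)] := by
      rw [← hcast, PySem.List.pyRange_one_succ_right (by omega)]
    rw [happ, List.foldl_append, List.foldl_cons, List.foldl_nil]
    set st := (PySem.List.pyRange 2 ((j : Int) + 1) 1).foldl (AStep n) (AInit n) with hst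
    obtain ⟨hlen', hchar'⟩ := innerA_char n (j + 1) (by omega) st.1 hL1
    show (_ ∧ _ ∧ _ ∧ _)
    rw [AStep]
    simp only
    constructor
    · exact hlen'
    refine ⟨?_, ?_, ?_⟩
    · rw [List.length_set, hL2]
    · intro k hk
      rw [hchar' k hk, hds k hk, Finset.sum_Icc_succ_top (by omega)]
      ring
    · intro k hk
      have htn1 : (((j + 1 : Nat) : Int)).toNat = j + 1 := by omega
      have htn2 : ((((j + 1 : Nat) : Int)) - 1).toNat = j := by omega
      rw [htn1, htn2]
      have hgj : st.2.getD j 0 = Gpre j := by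
        rw [hg j (by omega), if_pos (by omega)]
      have hdsj : ((PySem.List.pyRange 1
          (PySem.Int.floordiv (↑n) (((j + 1 : Nat)) : Int) + 1) 1).foldl
            (fun ds mult =>
              ds.set (mult * (((j + 1 : Nat)) : Int)).toNat
                (ds.getD (mult * (((j + 1 : Nat)) : Int)).toNat 0 + (((j + 1 : Nat)) : Int))) st.1).getD (j + 1) 0
          = sigInt (j + 1) := by
        rw [hchar' (j + 1) (by omega), hds (j + 1) (by omega),
          if_pos ⟨dvd_refl _, le_refl _⟩, ← sum_Icc2_dvd (j + 1) (by omega),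
          Finset.sum_Icc_succ_top (by omega), if_pos ⟨dvd_refl _, le_refl _⟩]
        ring
      rw [hdsj, hgj, ← Gpre_succ]
      rw [getD_set_self _ _ _ _ (by omega)]
      by_cases hjk : j + 1 = k
      · rw [if_pos hjk, ← hjk, if_pos (by omega)]
      · rw [if_neg hjk, hg k hk]
        by_cases hk1 : 1 ≤ k ∧ k ≤ j
        · rw [if_pos hk1, if_pos (by omega)]
        · rw [if_neg hk1, if_neg (by omega)]

def BStep (n : Nat) : List Int → Int → List Int :=
  fun s d =>
    (PySem.List.pyRange d (PySem.Int.floordiv (n : Int) d + 1) 1).foldl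
      (fun s m =>
        s.set (d * m).toNat
          (s.getD (d * m).toNat 0 + if d = m then d else d + m)) s

theorem B_outer (n : Nat) (j : Nat) (hj : j ≤ n) :
    (((PySem.List.pyRange 1 ((j : Int) + 1) 1).foldl (BStep n)
        (List.replicate (n + 1) (0 : Int))).length = n + 1) ∧
    (∀ k, k ≤ n →
      ((PySem.List.pyRange 1 ((j : Int) + 1) 1).foldl (BStep n)
        (List.replicate (n + 1) (0 : Int))).getD k 0
        = ∑ d ∈ Finset.Icc 1 j,
            (if d ∣ k ∧ d * d ≤ k then (if d * d = k then (d : Int) else (d : Int) + (k / d : Nat)) else 0)) := by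
  induction j with
  | zero =>
    have hempty : PySem.List.pyRange 1 ((0 : Nat) + 1) 1 = [] := by
      rw [PySem.List.pyRange_one]
      norm_num
    rw [hempty]
    simp only [List.foldl_nil]
    refine ⟨by simp, ?_⟩
    intro k hk
    rw [List.getD_replicate _ (by omega), Finset.Icc_eq_empty (by omega), Finset.sum_empty]
  | succ j ih =>
    have hj' : j ≤ n := by omega
    obtain ⟨hL, hs⟩ := ih hj'
    have hcast : ((j : Int) + 1) = (((j + 1 : Nat)) : Int) := by push_cast; ring
    have happ : PySem.List.pyRange 1 (((j + 1 : Nat) : Int) + 1) 1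
        = PySem.List.pyRange 1 ((j : Int) + 1) 1 ++ [((j + 1 : Nat) : Int)] := by
      rw [← hcast, PySem.List.pyRange_one_succ_right (by omega)]
    rw [happ, List.foldl_append, List.foldl_cons, List.foldl_nil]
    set st := (PySem.List.pyRange 1 ((j : Int) + 1) 1).foldl (BStep n) (List.replicate (n + 1) (0 : Int)) with hst
    obtain ⟨hlen', hchar'⟩ := innerB_char n (j + 1) (by omega) st hL
    rw [BStep]
    refine ⟨hlen', ?_⟩
    intro k hk
    rw [hchar' k hk, hs k hk, Finset.sum_Icc_succ_top (by omega)]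

def PStep (sigma : List Int) : List Int × Int → Int → List Int × Int :=
  fun st k =>
    let total := st.2 + sigma.getD k.toNat 0
    (st.1.set k.toNat total, total)

theorem B_phase2 (n : Nat) (sigma : List Int)
    (hsig : ∀ k, k ≤ n → sigma.getD k 0 = if 1 ≤ k then sigInt k else 0)
    (t : Nat) (ht : t ≤ n) :
    (((PySem.List.pyRange 1 ((t : Int) + 1) 1).foldl (PStep sigma)
        (List.replicate (n + 1) (0 : Int), 0)).2 = Gpre t) ∧
    (((PySem.List.pyRange 1 ((t : Int) + 1) 1).foldl (PStep sigma)
        (List.replicate (n + 1) (0 : Int), 0)).1.length = n + 1) ∧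
    (∀ k, k ≤ n →
      ((PySem.List.pyRange 1 ((t : Int) + 1) 1).foldl (PStep sigma)
        (List.replicate (n + 1) (0 : Int), 0)).1.getD k 0
        = if 1 ≤ k ∧ k ≤ t then Gpre k else 0) := by
  induction t with
  | zero =>
    have hempty : PySem.List.pyRange 1 ((0 : Nat) + 1) 1 = [] := by
      rw [PySem.List.pyRange_one]
      norm_num
    rw [hempty]
    simp only [List.foldl_nil]
    refine ⟨Gpre_zero.symm, by simp, ?_⟩
    intro k hk
    rw [List.getD_replicate _ (by omega), if_neg (by omega)]
  | succ t ih =>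
    have ht' : t ≤ n := by omega
    obtain ⟨htot, hL, hval⟩ := ih ht'
    have hcast : ((t : Int) + 1) = (((t + 1 : Nat)) : Int) := by push_cast; ring
    have happ : PySem.List.pyRange 1 (((t + 1 : Nat) : Int) + 1) 1
        = PySem.List.pyRange 1 ((t : Int) + 1) 1 ++ [((t + 1 : Nat) : Int)] := by
      rw [← hcast, PySem.List.pyRange_one_succ_right (by omega)]
    rw [happ, List.foldl_append, List.foldl_cons, List.foldl_nil]
    set st := (PySem.List.pyRange 1 ((t : Int) + 1) 1).foldl (PStep sigma)
      (List.replicate (n + 1) (0 : Int), 0) with hst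
    rw [PStep]
    simp only
    have htn : (((t + 1 : Nat) : Int)).toNat = t + 1 := by omega
    rw [htn, htot]
    have hsigt : sigma.getD (t + 1) 0 = sigInt (t + 1) := by
      rw [hsig (t + 1) (by omega), if_pos (by omega)]
    rw [hsigt, ← Gpre_succ]
    refine ⟨rfl, by rw [List.length_set]; exact hL, ?_⟩
    intro k hk
    rw [getD_set_self _ _ _ _ (by omega)]
    by_cases htk : t + 1 = k
    · rw [if_pos htk, ← htk, if_pos (by omega)]
    · rw [if_neg htk, hval k hk]
      by_cases hk1 : 1 ≤ k ∧ k ≤ t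
      · rw [if_pos hk1, if_pos (by omega)]
      · rw [if_neg hk1, if_neg (by omega)]

theorem main_equiv (N : Int) (h : 1 ≤ N) : calculate_f_g N = calculate_f_g_alt N := by
  obtain ⟨n, rfl⟩ : ∃ n : Nat, N = (n : Int) := ⟨N.toNat, (Int.toNat_of_nonneg (by omega)).symm⟩
  have hn : 1 ≤ n := by exact_mod_cast h
  have htn : ((n : Int) + 1).toNat = n + 1 := by omega
  have hA : calculate_f_g (n : Int)
      = ((PySem.List.pyRange 2 ((n : Int) + 1) 1).foldl (AStep n) (AInit n)).2 := by
    simp only [calculate_f_g, AInit, htn]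
    rfl
  have hB : calculate_f_g_alt (n : Int)
      = ((PySem.List.pyRange 1 ((n : Int) + 1) 1).foldl
          (PStep ((PySem.List.pyRange 1 ((n : Int) + 1) 1).foldl (BStep n)
            (List.replicate (n + 1) (0 : Int))))
          (List.replicate (n + 1) (0 : Int), 0)).1 := by
    simp only [calculate_f_g_alt, htn]
    rfl
  obtain ⟨_, hgL, _, hgv⟩ := A_outer n hn n hn le_rfl
  obtain ⟨hSL, hSval⟩ := B_outer n n le_rfl
  have hsig : ∀ k, k ≤ n →
      ((PySem.List.pyRange 1 ((n : Int) + 1) 1).foldl (BStep n)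
        (List.replicate (n + 1) (0 : Int))).getD k 0 = if 1 ≤ k then sigInt k else 0 := by
    intro k hk
    rw [hSval k hk]
    by_cases hk1 : 1 ≤ k
    · rw [if_pos hk1, sum_Icc1_pairs n k hk1 hk]
    · have hk0 : k = 0 := by omega
      subst hk0
      rw [if_neg hk1, sum_Icc1_pairs_zero n]
  obtain ⟨_, hpL, hpv⟩ := B_phase2 n _ hsig n le_rfl
  rw [hA, hB]
  apply List.ext_getElem (by rw [hgL, hpL])
  intro i h1 h2
  have hi : i ≤ n := by rw [hgL] at h1; omega
  rw [← List.getD_eq_getElem _ 0 h1, ← List.getD_eq_getElem _ 0 h2, hgv i hi, hpv i hi]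

-- ===== VERDICT (by name: the statement is the Claim_ definition above) =====
theorem calculate_f_g_spec : Claim_equal_calculate_f_g := by
  intro N_max _ hPre
  unfold Spec_calculate_f_g
  exact main_equiv N_max hPre

theorem calculate_f_g_raises : Claim_raises_calculate_f_g := by
  unfold Claim_raises_calculate_f_g
  refine ⟨?_, by decide⟩
  intro N_max _ hR hP
  unfold Raises_calculate_f_g at hR
  unfold Pre_calculate_f_g at hP
  omega

theorem calculate_f_g_raises_witness_ok :
    Raises_calculate_f_g pvRaiseWitness_calculate_f_g := calculate_f_g_raises.2.2.1
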